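-- pv_equiv track=rewrite | github.com/XuanwuLab/HSBRiskEvaluator | scripts/fetch_repo_infos.py | get_unique_packages_by_git_url
-- ===== SOURCE A (Python) =====
-- from typing import Dict
--
-- def get_unique_packages_by_git_url(package_dict_by_name: Dict) -> tuple[Dict, Dict]:
--     """
--     Sort packages so that for packages with the same upstream_git_url,
--     one goes to the unique and others go to the duplicated.
--
--     Args:
--         package_dict_by_name: Dictionary of package_name -> package_info
--
--     Returns:
--         Tuple[Dict, Dict]: (unique_packages, duplicated_packages) dictionaries
--     """
--     from collections import defaultdict
--
--     # Group packages by their upstream_git_url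
--     url_groups = defaultdict(list)
--     packages_without_url = []
--
--     for package_name, package_info in package_dict_by_name.items():
--         git_url = package_info.get("upstream_git_url")
--         if git_url:
--             url_groups[git_url].append((package_name, package_info))
--         else:
--             packages_without_url.append((package_name, package_info))
--
--     # Build the sorted result
--     unique_packages = []  # First occurrence of each URL group
--     duplicated_packages = []    # Additional packages with same URLs
--
--     for git_url, packages in url_groups.items():
--         if len(packages) == 1:
--             # Single package with this URL - goes to unique
--             unique_packages.extend(packages)
--         else:
--             # Multiple packages with same URL - first goes to unique, others to duplicated
--             unique_packages.append(packages[0])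
--             duplicated_packages.extend(packages[1:])
--
--     # Add packages without URL to unique packages
--     unique_packages.extend(packages_without_url)
--
--     # Convert to dictionaries
--     unique_dict = {package_name: package_info for package_name, package_info in unique_packages}
--     duplicated_dict = {package_name: package_info for package_name, package_info in duplicated_packages}
--
--     return unique_dict, duplicated_dict
-- ===== SOURCE B (Python) =====
-- def get_unique_packages_by_git_url(package_dict_by_name):
--     """Declarative rewrite: dedup the truthy urls in first-seen order; per url the
--     first matching package goes to unique and the rest to duplicated; packages
--     without a (truthy) url are appended to unique at the end."""
--     def url_of(info):
--         return info.get("upstream_git_url")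
--
--     items = list(package_dict_by_name.items())
--
--     urls = []
--     for _, info in items:
--         u = url_of(info)
--         if u and u not in urls:
--             urls.append(u)
--
--     unique, duplicated = {}, {}
--     for u in urls:
--         group = [(name, info) for name, info in items if url_of(info) == u]
--         unique[group[0][0]] = group[0][1]
--         for name, info in group[1:]:
--             duplicated[name] = info
--     for name, info in items:
--         if not url_of(info):
--             unique[name] = info
--     return unique, duplicated
-- ===== Notes on version B (the rewrite author's own statement) =====
-- stated objective: simpler
-- what changed: Replaces A's defaultdict-grouping pass plus a second pass over the groups with a declarative form: dedup the truthy urls in first-seen order, then per url a comprehension picks the first matching package for unique and the rest for duplicated; no intermediate group dict or pair lists are built.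
import Mathlib
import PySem

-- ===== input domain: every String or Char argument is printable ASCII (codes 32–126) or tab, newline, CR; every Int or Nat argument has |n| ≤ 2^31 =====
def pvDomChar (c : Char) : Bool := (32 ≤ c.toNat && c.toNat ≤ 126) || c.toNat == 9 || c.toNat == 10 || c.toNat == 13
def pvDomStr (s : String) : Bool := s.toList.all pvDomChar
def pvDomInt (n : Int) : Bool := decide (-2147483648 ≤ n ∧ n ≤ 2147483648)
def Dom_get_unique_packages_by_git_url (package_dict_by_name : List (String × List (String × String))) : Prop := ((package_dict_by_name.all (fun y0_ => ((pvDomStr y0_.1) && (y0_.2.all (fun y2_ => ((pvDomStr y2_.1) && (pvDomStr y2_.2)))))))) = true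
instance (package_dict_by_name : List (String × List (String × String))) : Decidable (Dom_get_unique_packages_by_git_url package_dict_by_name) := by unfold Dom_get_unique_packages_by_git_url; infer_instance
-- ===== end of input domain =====

-- B replaces A's defaultdict-grouping pass plus second pass over the groups by a declarative
-- form (dedup the truthy urls, then per url take first match as unique, rest as duplicated);
-- equivalence of the two traversal orders is proved for every input.

-- ===== PORT A =====
-- package_info.get("upstream_git_url")  (dict lookup with default None)
def pvUrlOf (info : List (String × String)) : Option String :=
  PySem.Dict.get? ⟨info⟩ "upstream_git_url"

-- Python truthiness of an Optional[str]: None and "" are falsy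
def pvTruthy : Option String → Bool
  | some s => !(s == "")
  | none => false

def get_unique_packages_by_git_url (package_dict_by_name : List (String × List (String × String))) : (List (String × List (String × String))) × (List (String × List (String × String))) :=
  -- first loop: url_groups (defaultdict(list)) and packages_without_url
  let st1 := package_dict_by_name.foldl
    (fun (st : PySem.Dict String (List (String × List (String × String))) × List (String × List (String × String))) it =>
      let git_url := pvUrlOf it.2
      if pvTruthy git_url then
        (st.1.modify (git_url.getD "") [] (fun g => g ++ [it]), st.2)
      else
        (st.1, st.2 ++ [it]))
    (PySem.Dict.empty, [])
  -- second loop over url_groups.items(); packages[0] / packages[1:] as take 1 / drop 1 (groups are nonempty)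
  let st2 := st1.1.items.foldl
    (fun (st : List (String × List (String × String)) × List (String × List (String × String))) gp =>
      if gp.2.length == 1 then (st.1 ++ gp.2, st.2)
      else (st.1 ++ gp.2.take 1, st.2 ++ gp.2.drop 1))
    ([], [])
  let unique_packages := st2.1 ++ st1.2
  -- dict comprehensions
  let unique_dict := unique_packages.foldl
    (fun (d : PySem.Dict String (List (String × String))) p => d.insert p.1 p.2) PySem.Dict.empty
  let duplicated_dict := st2.2.foldl
    (fun (d : PySem.Dict String (List (String × String))) p => d.insert p.1 p.2) PySem.Dict.empty
  (unique_dict.items, duplicated_dict.items)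

-- ===== PORT B =====
def get_unique_packages_by_git_url_alt (package_dict_by_name : List (String × List (String × String))) : (List (String × List (String × String))) × (List (String × List (String × String))) :=
  -- urls: the distinct truthy urls in first-seen order
  let urls : PySem.Set String := package_dict_by_name.foldl
    (fun (s : PySem.Set String) it =>
      let u := pvUrlOf it.2
      if pvTruthy u then PySem.Set.add s (u.getD "") else s)
    PySem.Set.empty
  -- per url: first matching package to unique, rest to duplicated (group[0] / group[1:] as take 1 / drop 1)
  let st := urls.foldl
    (fun (st : PySem.Dict String (List (String × String)) × PySem.Dict String (List (String × String))) u =>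
      let group := package_dict_by_name.filter (fun it => pvUrlOf it.2 == some u)
      ((group.take 1).foldl (fun d p => d.insert p.1 p.2) st.1,
       (group.drop 1).foldl (fun d p => d.insert p.1 p.2) st.2))
    (PySem.Dict.empty, PySem.Dict.empty)
  -- packages without a truthy url go to unique
  let unique := package_dict_by_name.foldl
    (fun (d : PySem.Dict String (List (String × String))) it =>
      if pvTruthy (pvUrlOf it.2) then d else d.insert it.1 it.2)
    st.1
  (unique.items, st.2.items)

-- ===== PRECONDITION & SPEC =====
def Spec_get_unique_packages_by_git_url (package_dict_by_name : List (String × List (String × String))) (out : (List (String × List (String × String))) × (List (String × List (String × String)))) : Prop := out = get_unique_packages_by_git_url_alt package_dict_by_name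
instance (package_dict_by_name : List (String × List (String × String))) (out : (List (String × List (String × String))) × (List (String × List (String × String)))) : Decidable (Spec_get_unique_packages_by_git_url package_dict_by_name out) := by unfold Spec_get_unique_packages_by_git_url; infer_instance

-- ===== CLAIM (what is proved, stated in full; the proofs are below) =====
def Claim_equal_get_unique_packages_by_git_url : Prop := ∀ (package_dict_by_name : List (String × List (String × String))), Dom_get_unique_packages_by_git_url package_dict_by_name → Spec_get_unique_packages_by_git_url package_dict_by_name (get_unique_packages_by_git_url package_dict_by_name)

-- ===== LEMMAS AND PROOFS =====

-- abbreviations used only by the proofs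
def pvKey (it : String × List (String × String)) : String := (pvUrlOf it.2).getD ""
def pvFT (pkgs : List (String × List (String × String))) : List (String × List (String × String)) :=
  pkgs.filter (fun it => pvTruthy (pvUrlOf it.2))
def pvW (pkgs : List (String × List (String × String))) : List (String × List (String × String)) :=
  pkgs.filter (fun it => !pvTruthy (pvUrlOf it.2))
def pvU (pkgs : List (String × List (String × String))) : PySem.Set String :=
  PySem.Set.ofList ((pvFT pkgs).map pvKey)
def pvG (pkgs : List (String × List (String × String))) (u : String) : List (String × List (String × String)) :=
  (pvFT pkgs).filter (fun it => pvKey it == u)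
def pvIns (d : PySem.Dict String (List (String × String))) (l : List (String × List (String × String))) :
    PySem.Dict String (List (String × String)) :=
  l.foldl (fun d p => d.insert p.1 p.2) d

-- A's first loop: the grouping dict and the without-url list
theorem pvA1 (pkgs : List (String × List (String × String))) :
    pkgs.foldl
      (fun (st : PySem.Dict String (List (String × List (String × String))) × List (String × List (String × String))) it =>
        if pvTruthy (pvUrlOf it.2) then
          (st.1.modify ((pvUrlOf it.2).getD "") [] (fun g => g ++ [it]), st.2)
        else
          (st.1, st.2 ++ [it]))
      (PySem.Dict.empty, [])
    = ((pvFT pkgs).foldl (fun d it => d.modify (pvKey it) [] (fun g => g ++ [it])) PySem.Dict.empty,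
       pvW pkgs) := by
  have hstep : (fun (st : PySem.Dict String (List (String × List (String × String))) × List (String × List (String × String))) it =>
        if pvTruthy (pvUrlOf it.2) then
          (st.1.modify ((pvUrlOf it.2).getD "") [] (fun g => g ++ [it]), st.2)
        else
          (st.1, st.2 ++ [it]))
      = (fun st it =>
        ((fun d it => if pvTruthy (pvUrlOf it.2) then PySem.Dict.modify d (pvKey it) [] (fun g => g ++ [it]) else d) st.1 it,
         (fun l it => if pvTruthy (pvUrlOf it.2) then l else l ++ [it]) st.2 it)) := by
    funext st it
    by_cases h : pvTruthy (pvUrlOf it.2) <;> simp [h, pvKey]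
  rw [hstep, PySem.List.foldl_prod_mk
    (fun (d : PySem.Dict String (List (String × List (String × String)))) it =>
      if pvTruthy (pvUrlOf it.2) then PySem.Dict.modify d (pvKey it) [] (fun g => g ++ [it]) else d)
    (fun (l : List (String × List (String × String))) it =>
      if pvTruthy (pvUrlOf it.2) then l else l ++ [it])]
  simp only [Prod.mk.injEq]
  refine ⟨?_, ?_⟩
  · rw [pvFT, List.foldl_filter]
  · have h2 : (fun (l : List (String × List (String × String))) it => if pvTruthy (pvUrlOf it.2) then l else l ++ [it])
        = (fun l it => if !pvTruthy (pvUrlOf it.2) then (fun (l : List (String × List (String × String))) it => l ++ [it]) l it else l) := by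
      funext l it; cases pvTruthy (pvUrlOf it.2) <;> simp
    rw [h2, ← List.foldl_filter, PySem.List.foldl_append_singleton, List.nil_append, pvW]
-- the grouping dict's items: distinct urls in first-seen order paired with their groups
theorem pvA2 (pkgs : List (String × List (String × String))) :
    ((pvFT pkgs).foldl (fun d it => d.modify (pvKey it) [] (fun g => g ++ [it])) PySem.Dict.empty).items
    = (pvU pkgs).map (fun u => (u, pvG pkgs u)) := by
  set D := (pvFT pkgs).foldl (fun d it => d.modify (pvKey it) [] (fun g => g ++ [it])) PySem.Dict.empty with hD
  have hkeys : D.keys = pvU pkgs := by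
    rw [hD, PySem.Dict.keys_foldl_modify_key (pvFT pkgs) pvKey [] (fun _ it => fun g => g ++ [it])]
    simp [PySem.Dict.keys_empty, PySem.Set.update_nil_left, pvU]
  have hnd : D.keys.Nodup := hkeys ▸ PySem.Set.nodup_ofList _
  have hget : ∀ u, D.getD u [] = pvG pkgs u := by
    intro u
    have hfold : D = ((pvFT pkgs).map (fun it => (pvKey it, it))).foldl
        (fun d p => d.modify p.1 [] (fun g => g ++ [p.2])) PySem.Dict.empty := by
      rw [List.foldl_map]
    rw [hfold, PySem.Dict.getD_foldl_modify_append, PySem.Dict.getD_empty, List.nil_append,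
      List.filter_map, List.map_map, pvG]
    simp [Function.comp_def]
  rw [PySem.Dict.items_eq_map_keys D hnd [], hkeys]
  exact List.map_congr_left (fun u _ => by rw [hget u])

-- A's second loop, over any list of groups
theorem pvA3 (L : List (String × List (String × List (String × String)))) :
    L.foldl
      (fun (st : List (String × List (String × String)) × List (String × List (String × String))) gp =>
        if gp.2.length == 1 then (st.1 ++ gp.2, st.2)
        else (st.1 ++ gp.2.take 1, st.2 ++ gp.2.drop 1))
      ([], [])
    = (L.flatMap (fun gp => gp.2.take 1), L.flatMap (fun gp => gp.2.drop 1)) := by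
  have hstep : (fun (st : List (String × List (String × String)) × List (String × List (String × String))) gp =>
        if gp.2.length == 1 then (st.1 ++ gp.2, st.2)
        else (st.1 ++ gp.2.take 1, st.2 ++ gp.2.drop 1))
      = (fun st gp =>
        ((fun l (gp : String × List (String × List (String × String))) => l ++ gp.2.take 1) st.1 gp,
         (fun l (gp : String × List (String × List (String × String))) => l ++ gp.2.drop 1) st.2 gp)) := by
    funext st gp
    by_cases h : gp.2.length = 1
    · rcases List.length_eq_one_iff.mp h with ⟨a, ha⟩
      simp [ha]
    · rw [if_neg (by simpa using h)]
  rw [hstep, PySem.List.foldl_prod_mk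
    (fun (l : List (String × List (String × String))) (gp : String × List (String × List (String × String))) => l ++ gp.2.take 1)
    (fun (l : List (String × List (String × String))) (gp : String × List (String × List (String × String))) => l ++ gp.2.drop 1)]
  rw [PySem.List.foldl_append_eq_flatMap, PySem.List.foldl_append_eq_flatMap, List.nil_append, List.nil_append]

-- B's first loop builds exactly the distinct truthy urls
theorem pvB1 (pkgs : List (String × List (String × String))) :
    pkgs.foldl
      (fun (s : PySem.Set String) it =>
        if pvTruthy (pvUrlOf it.2) then PySem.Set.add s ((pvUrlOf it.2).getD "") else s)
      PySem.Set.empty = pvU pkgs := by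
  have hstep : (fun (s : PySem.Set String) (it : String × List (String × String)) =>
        if pvTruthy (pvUrlOf it.2) then PySem.Set.add s ((pvUrlOf it.2).getD "") else s)
      = (fun s it => if pvTruthy (pvUrlOf it.2) then (fun (s : PySem.Set String) it => PySem.Set.add s (pvKey it)) s it else s) := by
    funext s it; simp [pvKey]
  rw [hstep, ← List.foldl_filter, ← PySem.Set.update_map_eq_foldl_add,
    show (PySem.Set.empty : PySem.Set String) = [] from rfl, PySem.Set.update_nil_left]
  rfl

-- every member of pvU is a nonempty url
theorem pvU_ne (pkgs : List (String × List (String × String))) (u : String) (hu : u ∈ pvU pkgs) :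
    u ≠ "" := by
  rw [pvU, PySem.Set.mem_ofList, List.mem_map] at hu
  obtain ⟨it, hit, hk⟩ := hu
  rw [pvFT] at hit
  have ht : pvTruthy (pvUrlOf it.2) = true := (List.mem_filter.mp hit).2
  cases h : pvUrlOf it.2 with
  | none => rw [h] at ht; simp [pvTruthy] at ht
  | some s =>
    rw [h] at ht
    simp [pvTruthy] at ht
    rw [← hk, pvKey, h]
    simpa using ht

-- B's filter agrees with the group of a url drawn from pvU
theorem pvGrp (pkgs : List (String × List (String × String))) (u : String) (hu : u ∈ pvU pkgs) :
    pkgs.filter (fun it => pvUrlOf it.2 == some u) = pvG pkgs u := by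
  have hne : u ≠ "" := pvU_ne pkgs u hu
  rw [pvG, pvFT, List.filter_filter]
  apply List.filter_congr
  intro it _
  cases h : pvUrlOf it.2 with
  | none => simp [pvTruthy]
  | some s =>
    by_cases hs : s = u
    · subst hs
      simp [pvTruthy, h, pvKey]
      exact hne
    · simp [pvTruthy, h, pvKey, hs]

-- B's final loop inserts exactly the without-url packages
theorem pvB3 (pkgs : List (String × List (String × String))) (d0 : PySem.Dict String (List (String × String))) :
    pkgs.foldl
      (fun (d : PySem.Dict String (List (String × String))) it =>
        if pvTruthy (pvUrlOf it.2) then d else d.insert it.1 it.2) d0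
    = pvIns d0 (pvW pkgs) := by
  have hstep : (fun (d : PySem.Dict String (List (String × String))) (it : String × List (String × String)) =>
        if pvTruthy (pvUrlOf it.2) then d else d.insert it.1 it.2)
      = (fun d it => if !pvTruthy (pvUrlOf it.2) then (fun (d : PySem.Dict String (List (String × String))) (p : String × List (String × String)) => d.insert p.1 p.2) d it else d) := by
    funext d it; cases pvTruthy (pvUrlOf it.2) <;> simp
  rw [hstep, ← List.foldl_filter, pvIns, pvW]

-- folding dict insertions over a flatMap, one url at a time
theorem pvFlat (U : List String) (h : String → List (String × List (String × String)))
    (d0 : PySem.Dict String (List (String × String))) :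
    U.foldl (fun d u => pvIns d (h u)) d0 = pvIns d0 (U.flatMap h) := by
  induction U generalizing d0 with
  | nil => simp [pvIns]
  | cons u us ih => simp only [List.foldl_cons, List.flatMap_cons, pvIns, List.foldl_append] at *; rw [ih]

-- ===== VERDICT (by name: the statement is the Claim_ definition above) =====
theorem get_unique_packages_by_git_url_spec : Claim_equal_get_unique_packages_by_git_url := by
  intro pkgs _
  show get_unique_packages_by_git_url pkgs = get_unique_packages_by_git_url_alt pkgs
  simp only [get_unique_packages_by_git_url, get_unique_packages_by_git_url_alt]
  rw [pvA1]
  dsimp only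
  rw [pvA2, pvA3]
  simp only [List.flatMap_map]
  rw [pvB1]
  have hcong : ∀ (acc : PySem.Dict String (List (String × String)) × PySem.Dict String (List (String × String))),
      ∀ u ∈ pvU pkgs,
      (fun (st : PySem.Dict String (List (String × String)) × PySem.Dict String (List (String × String))) u =>
        (((pkgs.filter (fun it => pvUrlOf it.2 == some u)).take 1).foldl (fun d p => d.insert p.1 p.2) st.1,
         ((pkgs.filter (fun it => pvUrlOf it.2 == some u)).drop 1).foldl (fun d p => d.insert p.1 p.2) st.2)) acc u
      = (fun (st : PySem.Dict String (List (String × String)) × PySem.Dict String (List (String × String))) u =>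
        ((fun (d : PySem.Dict String (List (String × String))) u => pvIns d ((pvG pkgs u).take 1)) st.1 u,
         (fun (d : PySem.Dict String (List (String × String))) u => pvIns d ((pvG pkgs u).drop 1)) st.2 u)) acc u := by
    intro acc u hu
    dsimp only
    rw [pvGrp pkgs u hu]
    rfl
  rw [PySem.List.foldl_congr_mem _ _ _ _ hcong]
  rw [PySem.List.foldl_prod_mk
    (fun (d : PySem.Dict String (List (String × String))) u => pvIns d ((pvG pkgs u).take 1))
    (fun (d : PySem.Dict String (List (String × String))) u => pvIns d ((pvG pkgs u).drop 1))]
  rw [pvFlat, pvFlat]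
  dsimp only
  rw [pvB3]
  rw [List.foldl_append]
  rfl
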